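-- pv_equiv track=rewrite | github.com/metaversnova/AstraLink-Professional | AstraLink.py | Tr1M
-- ===== SOURCE A (Python) =====
-- def Tr1M(obj):
--     if len(obj) > 1000:
--         f = obj.split("\n")
--         obj = ""
--         for i in f:
--             if len(obj)+ len(i) >= 1000:
--                 obj += "..."
--                 break
--             obj += i + "\n"
--     return obj
-- ===== SOURCE B (Python) =====
-- def Tr1M(obj):
--     if len(obj) <= 1000:
--         return obj
--     c = obj.rfind("\n", 0, 1000)
--     return obj[:c + 1] + "..."
-- ===== Notes on version B (the rewrite author's own statement) =====
-- stated objective: alternative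
-- what changed: B replaces A's split-into-lines-and-reaccumulate loop by a single rfind of the last newline before index 1000 and one slice of the original string.
import Mathlib
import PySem

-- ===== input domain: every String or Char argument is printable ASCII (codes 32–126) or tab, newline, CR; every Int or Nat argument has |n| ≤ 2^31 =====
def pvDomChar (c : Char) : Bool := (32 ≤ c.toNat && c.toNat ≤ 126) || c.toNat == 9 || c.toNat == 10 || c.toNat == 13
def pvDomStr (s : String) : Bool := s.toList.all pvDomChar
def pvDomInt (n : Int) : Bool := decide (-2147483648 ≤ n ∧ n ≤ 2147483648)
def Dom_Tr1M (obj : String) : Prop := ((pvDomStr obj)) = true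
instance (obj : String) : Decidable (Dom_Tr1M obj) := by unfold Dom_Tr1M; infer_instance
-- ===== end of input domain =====

-- B replaces A's split-into-lines-and-reaccumulate loop by one rfind of the last newline
-- before index 1000 plus one slice (objective: alternative algorithm, same result).

-- ===== PORT A =====
-- A's for-loop over the split pieces; the 'break' is the early return of the first branch
def Tr1MLoop : List (List Char) → List Char → List Char
  | [], acc => acc
  | i :: rest, acc =>
    if acc.length + i.length ≥ 1000 then acc ++ ['.', '.', '.']
    else Tr1MLoop rest (acc ++ i ++ ['\n'])

def Tr1M (obj : String) : String :=
  if PySem.Str.len obj > 1000 then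
    String.ofList (Tr1MLoop (PySem.Chars.splitOn obj.toList ['\n']) [])
  else obj

-- ===== PORT B =====
def Tr1M_alt (obj : String) : String :=
  if PySem.Str.len obj ≤ 1000 then obj
  else
    let c := PySem.Str.rfindFrom obj "\n" 0 (some 1000)
    String.ofList (PySem.Chars.slice obj.toList none (some (c + 1)) ++ ['.', '.', '.'])

-- ===== PRECONDITION & SPEC =====
def Spec_Tr1M (obj : String) (out : String) : Prop := out = Tr1M_alt obj
instance (obj : String) (out : String) : Decidable (Spec_Tr1M obj out) := by unfold Spec_Tr1M; infer_instance

-- ===== CLAIM (what is proved, stated in full; the proofs are below) =====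
def Claim_equal_Tr1M : Prop := ∀ (obj : String), Dom_Tr1M obj → Spec_Tr1M obj (Tr1M obj)

-- ===== LEMMAS AND PROOFS =====

theorem pv_modifyHead_id {α : Type} (l : List α) : List.modifyHead (fun x => x) l = l := by
  cases l <;> rfl

-- a one-character pattern is a prefix iff it is the head
theorem pv_prefix_single (d : Char) (xs : List Char) :
    [d].isPrefixOf xs = true ↔ xs.head? = some d := by
  cases xs with
  | nil => simp [List.isPrefixOf]
  | cons c cs =>
    show (d == c && true) = true ↔ _
    simp only [Bool.and_true, beq_iff_eq, List.head?_cons, Option.some.injEq]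
    exact eq_comm

-- PySem.Chars.splitOn with a one-character separator is Mathlib's List.splitOn
theorem pv_splitOn_go_eq (d : Char) (fuel : Nat) :
    ∀ (l cur : List Char) (acc : List (List Char)), l.length < fuel →
    PySem.Chars.splitOn.go [d] fuel l cur acc
      = acc.reverse ++ (List.splitOn d l).modifyHead (cur.reverse ++ ·) := by
  induction fuel with
  | zero => intro l cur acc h; omega
  | succ fuel ih =>
    intro l cur acc h
    cases l with
    | nil => simp [PySem.Chars.splitOn.go, List.splitOn_nil]
    | cons c rest =>
      rw [PySem.Chars.splitOn.go]
      by_cases hdc : d = c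
      · subst hdc
        simp only [List.isPrefixOf, beq_self_eq_true, Bool.true_and, if_true]
        rw [ih _ _ _ (by simpa using Nat.lt_of_succ_lt_succ h)]
        simp only [List.splitOn, List.splitOnP_cons, beq_self_eq_true, if_true]
        simp [pv_modifyHead_id]
      · have hbeq : ([d].isPrefixOf (c :: rest)) = false := by
          show (d == c && List.isPrefixOf [] rest) = false
          simp [hdc]
        rw [if_neg (by simp [hbeq])]
        rw [ih _ _ _ (by simpa using Nat.lt_of_succ_lt_succ h)]
        have h2 : List.splitOn d (c :: rest) = (List.splitOn d rest).modifyHead (List.cons c) := by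
          simp [List.splitOn, List.splitOnP_cons, Ne.symm hdc]
        rw [h2, List.modifyHead_modifyHead]
        have h3 : (fun x => (c :: cur).reverse ++ x) = ((fun x => cur.reverse ++ x) ∘ List.cons c) := by
          funext x; simp
        rw [h3]

theorem pv_splitOn_single (d : Char) (l : List Char) :
    PySem.Chars.splitOn l [d] = List.splitOn d l := by
  rw [PySem.Chars.splitOn, pv_splitOn_go_eq d (l.length + 1) l [] [] (by omega)]
  simp [pv_modifyHead_id]

-- the pieces of List.splitOn never contain the separator
theorem pv_not_mem_splitOn (d : Char) (l : List Char) :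
    ∀ x ∈ List.splitOn d l, d ∉ x := by
  induction l with
  | nil => simp [List.splitOn_nil]
  | cons c rest ih =>
    by_cases hdc : c = d
    · subst hdc
      simp only [List.splitOn, List.splitOnP_cons, beq_self_eq_true, if_true]
      intro x hx
      rcases List.mem_cons.mp hx with h | h
      · simp [h]
      · exact ih x (by simpa [List.splitOn] using h)
    · simp only [List.splitOn, List.splitOnP_cons, beq_iff_eq, if_neg hdc]
      intro x hx
      cases hsp : List.splitOnP (fun x => x == d) rest with
      | nil => rw [hsp] at hx; simp at hx
      | cons y ys =>
        rw [hsp] at hx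
        simp only [List.modifyHead] at hx
        rcases List.mem_cons.mp hx with h | h
        · subst h
          intro hmem
          rcases List.mem_cons.mp hmem with h' | h'
          · exact hdc h'.symm
          · exact ih y (by simp [List.splitOn, hsp]) h'
        · refine ih x ?_
          have : List.splitOn d rest = y :: ys := by simp [List.splitOn, hsp]
          rw [this]
          exact List.mem_cons_of_mem _ h

-- rfind.go skips over a match-free stretch of indices
theorem pv_rfind_go_skip (s sub : List Char) :
    ∀ (j q : Nat), q ≤ j → (∀ i, q < i → i ≤ j → sub.isPrefixOf (s.drop i) = false) →
    PySem.Chars.rfind.go s sub j = PySem.Chars.rfind.go s sub q := by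
  intro j
  induction j with
  | zero => intro q hq _; interval_cases q; rfl
  | succ j ih =>
    intro q hq hno
    rcases Nat.eq_or_lt_of_le hq with h | h
    · rw [h]
    · have hq' : q ≤ j := by omega
      rw [PySem.Chars.rfind.go]
      rw [hno (j + 1) (by omega) (by omega)]
      simp only [if_false, Bool.false_eq_true]
      exact ih q hq' (fun i h1 h2 => hno i h1 (by omega))

-- rfind of a single character: no match at or above q, a match just below q ⇒ result q - 1
theorem pv_rfind_eq_of (s : List Char) (d : Char) (q : Nat) (hq : q ≤ s.length)
    (hno : ∀ i, q ≤ i → [d].isPrefixOf (s.drop i) = false)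
    (hyes : ∀ m, q = m + 1 → [d].isPrefixOf (s.drop m) = true) :
    PySem.Chars.rfind s [d] = (q : Int) - 1 := by
  rw [PySem.Chars.rfind]
  rw [pv_rfind_go_skip s [d] s.length q hq (fun i h1 h2 => hno i (by omega))]
  cases q with
  | zero =>
    rw [PySem.Chars.rfind.go]
    have := hno 0 (by omega)
    simp only [List.drop_zero] at this
    rw [this]
    simp
  | succ m =>
    rw [PySem.Chars.rfind.go]
    rw [hno (m + 1) (by omega)]
    simp only [if_false, Bool.false_eq_true]
    cases m with
    | zero =>
      have := hyes 0 rfl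
      simp only [List.drop_zero] at this
      rw [PySem.Chars.rfind.go, this]
      simp
    | succ m' =>
      rw [PySem.Chars.rfind.go, hyes (m' + 1) rfl]
      simp

theorem pv_neg_one_le_rfind (s sub : List Char) : -1 ≤ PySem.Chars.rfind s sub := by
  rw [PySem.Chars.rfind]
  generalize s.length = j
  induction j with
  | zero => rw [PySem.Chars.rfind.go]; split <;> simp
  | succ j ih =>
    rw [PySem.Chars.rfind.go]; split
    · omega
    · exact ih

-- B's rfind("\n", 0, 1000) on a string longer than 1000 is rfind on the first 1000 chars
theorem pv_rfindFrom_reduce (L : List Char) (h : 1000 < L.length) :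
    PySem.Chars.rfindFrom L ['\n'] 0 (some 1000) = PySem.Chars.rfind (L.take 1000) ['\n'] := by
  rw [PySem.Chars.rfindFrom]
  have h1 : ¬ ((L.length : Int) < 1000) := by exact_mod_cast not_lt.mpr (by omega)
  simp only [h1, if_false]
  norm_num
  rw [show Int.toNat 1000 = 1000 from rfl]
  split
  · rename_i hc; rw [hc]
  · rfl

-- at A's break point, the last newline among the first 1000 chars sits right before acc
theorem pv_break_case (acc i t : List Char) (hi : '\n' ∉ i)
    (hend : acc = [] ∨ ∃ a, acc = a ++ ['\n'])
    (hq : acc.length ≤ 1000) (hbreak : 1000 ≤ acc.length + i.length)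
    (hL : 1000 < (acc ++ (i ++ t)).length) :
    PySem.Chars.rfind ((acc ++ (i ++ t)).take 1000) ['\n'] = (acc.length : Int) - 1 := by
  set L := acc ++ (i ++ t) with hLdef
  have hslen : (L.take 1000).length = 1000 := by simp [List.length_take]; omega
  apply pv_rfind_eq_of _ _ _ (by omega)
  · intro i0 hi0
    rw [← Bool.not_eq_true, pv_prefix_single]
    rw [List.head?_drop, List.getElem?_take]
    by_cases hlt : i0 < 1000
    · rw [if_pos hlt]
      rw [hLdef, List.getElem?_append_right (by omega)]
      have hlt2 : i0 - acc.length < i.length := by omega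
      rw [List.getElem?_append_left hlt2]
      intro hsome
      exact hi (List.mem_of_getElem? hsome)
    · rw [if_neg hlt]; simp
  · intro m hm
    rcases hend with h0 | ⟨a, ha⟩
    · rw [h0] at hm; simp at hm
    · rw [pv_prefix_single, List.head?_drop, List.getElem?_take]
      have hmlt : m < 1000 := by omega
      rw [if_pos hmlt]
      have hma : m = a.length := by
        have := congrArg List.length ha; simp at this; omega
      rw [hLdef, List.getElem?_append_left (by omega), ha, hma,
        List.getElem?_append_right (by omega)]
      simp

-- the loop invariant: A's loop output is B's "take to the last newline before 1000, add dots"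
theorem pv_loop_main :
    ∀ (ls : List (List Char)) (acc : List Char),
    (∀ x ∈ ls, '\n' ∉ x) →
    (acc = [] ∨ ∃ a, acc = a ++ ['\n']) →
    acc.length ≤ 1000 →
    1000 < acc.length + (List.intercalate ['\n'] ls).length →
    Tr1MLoop ls acc
      = (acc ++ List.intercalate ['\n'] ls).take
          ((PySem.Chars.rfind ((acc ++ List.intercalate ['\n'] ls).take 1000) ['\n'] + 1).toNat)
        ++ ['.', '.', '.'] := by
  intro ls
  induction ls with
  | nil =>
    intro acc _ _ hq hlen
    simp [List.intercalate] at hlen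
    omega
  | cons i rest ih =>
    intro acc hpieces hend hq hlen
    by_cases hbr : acc.length + i.length ≥ 1000
    · rw [show Tr1MLoop (i :: rest) acc
          = acc ++ ['.', '.', '.'] from by rw [Tr1MLoop]; rw [if_pos hbr]]
      obtain ⟨t, ht⟩ : ∃ t, List.intercalate ['\n'] (i :: rest) = i ++ t := by
        cases rest with
        | nil => exact ⟨[], by simp [List.intercalate]⟩
        | cons r0 rs => exact ⟨'\n' :: List.intercalate ['\n'] (r0 :: rs), by
            simp [List.intercalate]⟩
      rw [ht]
      have hL : 1000 < (acc ++ (i ++ t)).length := by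
        rw [ht] at hlen; simp at hlen ⊢; omega
      rw [pv_break_case acc i t (hpieces i (by simp)) hend (by omega) hbr hL]
      have : ((acc.length : Int) - 1 + 1).toNat = acc.length := by omega
      rw [this]
      rw [show List.take acc.length (acc ++ (i ++ t)) = acc from List.take_left]
    · rw [show Tr1MLoop (i :: rest) acc
          = Tr1MLoop rest (acc ++ i ++ ['\n']) from by rw [Tr1MLoop]; rw [if_neg hbr]]
      cases rest with
      | nil =>
        exfalso
        simp [List.intercalate] at hlen
        omega
      | cons r0 rs =>
        have hic : List.intercalate ['\n'] (i :: r0 :: rs)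
            = i ++ ['\n'] ++ List.intercalate ['\n'] (r0 :: rs) := by
          simp [List.intercalate]
        rw [ih (acc ++ i ++ ['\n'])
          (fun x hx => hpieces x (by simp [hx]))
          (Or.inr ⟨acc ++ i, rfl⟩)
          (by simp; omega)
          (by rw [hic] at hlen; simp at hlen ⊢; omega)]
        rw [hic]
        simp [List.append_assoc]

theorem pv_Tr1M_eq (obj : String) : Tr1M obj = Tr1M_alt obj := by
  by_cases h : 1000 < obj.toList.length
  · have hlen : PySem.Str.len obj > 1000 := by
      rw [PySem.Str.len_eq]; exact_mod_cast h
    rw [Tr1M, if_pos hlen, Tr1M_alt, if_neg (by omega)]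
    have hnl : ("\n" : String).toList = ['\n'] := by decide
    rw [PySem.Str.rfindFrom_eq, hnl, pv_rfindFrom_reduce _ h]
    rw [pv_splitOn_single]
    rw [pv_loop_main (List.splitOn '\n' obj.toList) []
      (pv_not_mem_splitOn '\n' obj.toList) (Or.inl rfl) (by simp)
      (by simpa [List.intercalate_splitOn] using h)]
    have hnn : (0:Int) ≤ PySem.Chars.rfind (obj.toList.take 1000) ['\n'] + 1 := by
      have := pv_neg_one_le_rfind (obj.toList.take 1000) ['\n']; omega
    simp only [List.nil_append, List.intercalate_splitOn]
    simp [PySem.Chars.slice_eq_listSlice, PySem.List.slice_to _ hnn]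
  · have hlen : ¬ PySem.Str.len obj > 1000 := by
      rw [PySem.Str.len_eq]; omega
    rw [Tr1M, if_neg hlen, Tr1M_alt, if_pos (by rw [PySem.Str.len_eq]; omega)]

-- ===== VERDICT (by name: the statement is the Claim_ definition above) =====
theorem Tr1M_spec : Claim_equal_Tr1M := by
  intro obj _
  unfold Spec_Tr1M
  exact pv_Tr1M_eq obj
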